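-- pv_equiv track=rewrite | github.com/zjunlp/unlearn | evals/eval-dpsk-forget-retain/utils.py | merge_payloads_by_idx
-- ===== SOURCE A (Python) =====
-- def merge_payloads_by_idx(payloads):
--     merged_dict = {}
--     for payload in payloads:
--         idx = payload['idx']
--         if idx not in merged_dict:
--             merged_dict[idx] = {}
--             for k, v in payload.items():
--                 merged_dict[idx][k] = [v]
--         else:
--             for k, v in merged_dict[idx].items():
--                 merged_dict[idx][k].append(payload[k])
--     return merged_dict
-- ===== SOURCE B (Python) =====
-- def merge_payloads_by_idx(payloads):
--     # Phase 1: group payloads by idx (insertion order of first appearance).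
--     groups = {}
--     for p in payloads:
--         groups.setdefault(p['idx'], []).append(p)
--     # Phase 2: per group, the first payload fixes the keys (and their order);
--     # each key maps to the column of that key's values across the group.
--     return {idx: {k: [p[k] for p in group] for k in group[0]}
--             for idx, group in groups.items()}
-- ===== Notes on version B (the rewrite author's own statement) =====
-- stated objective: alternative
-- what changed: Replaces A's single-pass incremental append-merge of nested dicts with a two-phase group-then-transform: one pass groups payloads by idx, then each group is turned at once into {key: column of values} using the first payload's keys.
import Mathlib
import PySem

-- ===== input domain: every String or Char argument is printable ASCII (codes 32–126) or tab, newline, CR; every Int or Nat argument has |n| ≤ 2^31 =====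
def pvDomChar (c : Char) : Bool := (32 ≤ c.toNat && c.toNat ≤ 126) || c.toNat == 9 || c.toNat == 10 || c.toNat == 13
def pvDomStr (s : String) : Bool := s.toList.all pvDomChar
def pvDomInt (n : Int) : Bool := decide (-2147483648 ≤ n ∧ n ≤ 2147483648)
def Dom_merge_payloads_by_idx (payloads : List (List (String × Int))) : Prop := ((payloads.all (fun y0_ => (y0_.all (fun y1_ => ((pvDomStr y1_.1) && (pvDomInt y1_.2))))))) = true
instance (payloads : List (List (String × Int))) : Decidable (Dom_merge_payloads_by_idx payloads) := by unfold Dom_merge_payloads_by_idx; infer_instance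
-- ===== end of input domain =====

-- B replaces A's incremental append-merge by a two-phase group-then-transform (same cost, different structure);
-- neither program mutates its argument, so return-value equivalence is the whole story.

-- shared primitive: payload[k] for a payload given as an assoc list encoding a Python dict
def pvLook (p : List (String × Int)) (k : String) : Int :=
  ((PySem.Dict.mk p).get? k).getD 0
def pvIdx (p : List (String × Int)) : Int := pvLook p "idx"

-- ===== PORT A =====
-- first-seen idx: merged_dict[idx] = {}; for k, v in payload.items(): merged_dict[idx][k] = [v]
def pA_first (p : List (String × Int)) : PySem.Dict String (List Int) :=
  p.foldl (fun d kv => d.insert kv.1 [kv.2]) PySem.Dict.empty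

-- seen idx: for k, v in merged_dict[idx].items(): merged_dict[idx][k].append(payload[k])
-- (each existing entry gets payload[k] appended in place; keys and their order are unchanged)
def pA_step (m : PySem.Dict Int (PySem.Dict String (List Int))) (p : List (String × Int)) :
    PySem.Dict Int (PySem.Dict String (List Int)) :=
  let idx := pvIdx p
  if m.contains idx = false then
    m.insert idx (pA_first p)
  else
    let cur := (m.get? idx).getD PySem.Dict.empty
    m.insert idx (PySem.Dict.mk (cur.items.map (fun kv => (kv.1, kv.2 ++ [pvLook p kv.1]))))

def merge_payloads_by_idx (payloads : List (List (String × Int))) : List (Int × List (String × List Int)) :=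
  ((payloads.foldl pA_step PySem.Dict.empty).items).map (fun e => (e.1, e.2.items))

-- ===== PORT B =====
-- phase 1: groups.setdefault(p['idx'], []).append(p)
def pB_groups (payloads : List (List (String × Int))) : PySem.Dict Int (List (List (String × Int))) :=
  payloads.foldl (fun g p => g.modify (pvIdx p) [] (· ++ [p])) PySem.Dict.empty

-- phase 2: {k: [p[k] for p in group] for k in group[0]}
def pB_cols (group : List (List (String × Int))) : List (String × List Int) :=
  ((group.headD []).map Prod.fst).map (fun k => (k, group.map (fun p => pvLook p k)))

def merge_payloads_by_idx_alt (payloads : List (List (String × Int))) : List (Int × List (String × List Int)) :=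
  ((pB_groups payloads).items).map (fun e => (e.1, pB_cols e.2))

-- ===== PRECONDITION & SPEC =====
-- Pre_ = exactly the inputs on which the Python A returns: every payload carries an 'idx' key, and within
-- each idx-group every key of the group's first payload occurs in each later payload (otherwise payload[k]
-- or payload['idx'] raises KeyError).  The per-payload key-Nodup conjunct is a representation invariant of
-- the encoding (each payload encodes a Python dict, which cannot hold duplicate keys), not an exclusion of
-- Python inputs.
def Pre_merge_payloads_by_idx (payloads : List (List (String × Int))) : Prop :=
  (∀ p ∈ payloads, (p.map Prod.fst).Nodup ∧ "idx" ∈ p.map Prod.fst) ∧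
  (∀ j, (hj : j < payloads.length) → ∀ i, (hi : i < j) →
    pvIdx (payloads[i]'(hi.trans hj)) = pvIdx payloads[j] →
    (∀ m, (hm : m < i) → pvIdx (payloads[m]'(hm.trans (hi.trans hj))) ≠ pvIdx (payloads[i]'(hi.trans hj))) →
    ∀ k ∈ (payloads[i]'(hi.trans hj)).map Prod.fst, k ∈ payloads[j].map Prod.fst)

instance (payloads : List (List (String × Int))) : Decidable (Pre_merge_payloads_by_idx payloads) := by
  unfold Pre_merge_payloads_by_idx; infer_instance

def pvWitness_merge_payloads_by_idx : (List (List (String × Int))) :=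
  [[("idx", 1), ("a", 2)], [("idx", 1), ("a", 3)], [("idx", 0), ("b", 4)]]

def Spec_merge_payloads_by_idx (payloads : List (List (String × Int))) (out : List (Int × List (String × List Int))) : Prop := out = merge_payloads_by_idx_alt payloads
instance (payloads : List (List (String × Int))) (out : List (Int × List (String × List Int))) : Decidable (Spec_merge_payloads_by_idx payloads out) := by unfold Spec_merge_payloads_by_idx; infer_instance

-- ===== CLAIM (what is proved, stated in full; the proofs are below) =====
def Claim_equal_merge_payloads_by_idx : Prop := ∀ (payloads : List (List (String × Int))), Dom_merge_payloads_by_idx payloads → Pre_merge_payloads_by_idx payloads → Spec_merge_payloads_by_idx payloads (merge_payloads_by_idx payloads)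

-- ===== LEMMAS AND PROOFS =====

-- the A-side image of a B-side group entry
def pvF (e : Int × List (List (String × Int))) : Int × PySem.Dict String (List Int) :=
  (e.1, PySem.Dict.mk (pB_cols e.2))

theorem pv_get?_mk_map_F (l : List (Int × List (List (String × Int)))) (k : Int) :
    (PySem.Dict.mk (l.map pvF)).get? k = ((PySem.Dict.mk l).get? k).map (fun gl => PySem.Dict.mk (pB_cols gl)) := by
  have hpred : ((fun p => p.1 == k) ∘ pvF) = (fun (p : Int × List (List (String × Int))) => p.1 == k) := by
    funext e; simp [pvF]
  simp only [PySem.Dict.get?, List.find?_map, hpred, Option.map_map]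
  rfl

theorem pv_cols_single (p : List (String × Int)) (h : (p.map Prod.fst).Nodup) :
    pB_cols [p] = p.map (fun kv => (kv.1, [kv.2])) := by
  unfold pB_cols
  rw [List.map_map]
  refine List.map_congr_left (fun kv hkv => ?_)
  have hget : (PySem.Dict.mk p).get? kv.1 = some kv.2 := by
    refine PySem.Dict.get?_of_mem_items _ ?_ ?_
    · exact hkv
    · simpa [PySem.Dict.keys] using h
  simp [Function.comp, pvLook, hget]

theorem pv_pA_first_eq (p : List (String × Int)) (h : (p.map Prod.fst).Nodup) :
    pA_first p = PySem.Dict.mk (pB_cols [p]) := by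
  apply PySem.Dict.ext
  rw [pv_cols_single p h]
  unfold pA_first
  have := PySem.Dict.items_foldl_insert_fresh p (fun kv => kv.1) (fun kv => [kv.2]) PySem.Dict.empty
    (fun a _ => by simp [PySem.Dict.contains, PySem.Dict.empty]) h
  simpa using this

theorem pv_cols_append (gl : List (List (String × Int))) (p : List (String × Int)) (h : gl ≠ []) :
    pB_cols (gl ++ [p]) = (pB_cols gl).map (fun kv => (kv.1, kv.2 ++ [pvLook p kv.1])) := by
  obtain ⟨h0, t, rfl⟩ : ∃ h0 t, gl = h0 :: t := by
    cases gl with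
    | nil => exact absurd rfl h
    | cons a b => exact ⟨a, b, rfl⟩
  simp [pB_cols, List.map_map, Function.comp]

theorem pv_step (g : PySem.Dict Int (List (List (String × Int)))) (p : List (String × Int))
    (hp : (p.map Prod.fst).Nodup)
    (hg : ∀ e ∈ g.items, e.2 ≠ []) :
    pA_step (PySem.Dict.mk (g.items.map pvF)) p =
      PySem.Dict.mk ((g.modify (pvIdx p) [] (· ++ [p])).items.map pvF) := by
  have hcont : (PySem.Dict.mk (g.items.map pvF)).contains (pvIdx p) = g.contains (pvIdx p) := by
    have hpred : ((fun q => q.1 == pvIdx p) ∘ pvF) =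
        (fun (q : Int × List (List (String × Int))) => q.1 == pvIdx p) := by
      funext q; simp [pvF]
    simp [PySem.Dict.contains, List.any_map, hpred]
  by_cases hc : g.contains (pvIdx p) = true
  · obtain ⟨gl, hgl⟩ : ∃ gl, g.get? (pvIdx p) = some gl := by
      rw [PySem.Dict.contains_eq_isSome_get?] at hc
      exact Option.isSome_iff_exists.mp hc
    have hne : gl ≠ [] := hg _ (PySem.Dict.mem_items_of_get?_eq_some g hgl)
    have hget : (PySem.Dict.mk (g.items.map pvF)).get? (pvIdx p) = some (PySem.Dict.mk (pB_cols gl)) := by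
      rw [pv_get?_mk_map_F, hgl]; rfl
    have hgetD : g.getD (pvIdx p) [] = gl := PySem.Dict.getD_of_get?_eq_some g [] hgl
    simp only [pA_step, hcont, hc, Bool.true_eq_false, if_false, hget, Option.getD_some,
      PySem.Dict.modify, hgetD]
    rw [← pv_cols_append gl p hne]
    apply PySem.Dict.ext
    rw [PySem.Dict.items_insert_of_contains _ _ (by rw [hcont]; exact hc),
        PySem.Dict.items_insert_of_contains _ _ hc]
    simp only [List.map_map]
    refine List.map_congr_left (fun q hq => ?_)
    by_cases hqk : q.1 = pvIdx p
    · simp [pvF, Function.comp, hqk]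
    · simp [pvF, Function.comp, hqk]
  · have hcf : g.contains (pvIdx p) = false := by simpa using hc
    simp only [pA_step, hcont, hcf, if_true, PySem.Dict.modify,
      PySem.Dict.getD_of_not_contains _ _ hcf, List.nil_append]
    apply PySem.Dict.ext
    rw [PySem.Dict.items_insert_of_not_contains _ _ (by rw [hcont]; exact hcf),
        PySem.Dict.items_insert_of_not_contains _ _ hcf]
    simp [pvF, pv_pA_first_eq p hp]

theorem pv_inv (ps : List (List (String × Int))) (g : PySem.Dict Int (List (List (String × Int))))
    (hps : ∀ p ∈ ps, (p.map Prod.fst).Nodup)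
    (hg : ∀ e ∈ g.items, e.2 ≠ []) :
    ps.foldl pA_step (PySem.Dict.mk (g.items.map pvF)) =
      PySem.Dict.mk ((ps.foldl (fun g p => g.modify (pvIdx p) [] (· ++ [p])) g).items.map pvF) := by
  induction ps generalizing g with
  | nil => rfl
  | cons p ps ih =>
    simp only [List.foldl_cons]
    rw [pv_step g p (hps p (by simp)) hg]
    refine ih _ (fun q hq => hps q (List.mem_cons_of_mem _ hq)) ?_
    intro e he
    simp only [PySem.Dict.modify] at he
    rcases (PySem.Dict.mem_items_insert _ _ _ _).mp he with h1 | h2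
    · rw [h1]; simp
    · exact hg e h2.1

-- ===== VERDICT (by name: the statement is the Claim_ definition above) =====
theorem merge_payloads_by_idx_spec : Claim_equal_merge_payloads_by_idx := by
  intro payloads _ hpre
  unfold Spec_merge_payloads_by_idx merge_payloads_by_idx merge_payloads_by_idx_alt pB_groups
  have h := pv_inv payloads PySem.Dict.empty (fun p hp => (hpre.1 p hp).1)
    (by intro e he; simp [PySem.Dict.empty] at he)
  rw [show (PySem.Dict.empty : PySem.Dict Int (PySem.Dict String (List Int))) =
        PySem.Dict.mk (((PySem.Dict.empty : PySem.Dict Int (List (List (String × Int)))).items).map pvF) from rfl,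
      h]
  simp [pvF, List.map_map, Function.comp]
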